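-- pv_equiv track=rewrite | github.com/fkfouri/HackerHank_PythonStudy | Problem Solving/010 - Matrix.py | revertCol
-- ===== SOURCE A (Python) =====
-- def revertArray(line):
--     return line[::-1]
--
-- def revertCol(matrix, n, col):
--     temp =[]
--     for i in range (2*n):
--         temp.append(matrix[i][col])
--         #temp[1,i] = matrix[i][col-1]
--
--     temp = revertArray(temp)
--     for i in range (2*n):
--         matrix[i][col] = temp[i]
--
--     return matrix[:]
-- ===== SOURCE B (Python) =====
-- def revertCol(matrix, n, col):
--     # Reverse column `col` of the 2n-row matrix in place with one two-pointer
--     # pass (swap row i with row 2n-1-i), instead of extract/reverse/write-back.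
--     for i in range(n):
--         j = 2 * n - 1 - i
--         tmp = matrix[i][col]
--         matrix[i][col] = matrix[j][col]
--         matrix[j][col] = tmp
--     return matrix[:]
-- ===== Notes on version B (the rewrite author's own statement) =====
-- stated objective: simpler
-- what changed: Replaces the three-phase extract/reverse/write-back with a single in-place two-pointer pass that swaps matrix[i][col] with matrix[2n-1-i][col]; no temporary list is built.
import Mathlib
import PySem

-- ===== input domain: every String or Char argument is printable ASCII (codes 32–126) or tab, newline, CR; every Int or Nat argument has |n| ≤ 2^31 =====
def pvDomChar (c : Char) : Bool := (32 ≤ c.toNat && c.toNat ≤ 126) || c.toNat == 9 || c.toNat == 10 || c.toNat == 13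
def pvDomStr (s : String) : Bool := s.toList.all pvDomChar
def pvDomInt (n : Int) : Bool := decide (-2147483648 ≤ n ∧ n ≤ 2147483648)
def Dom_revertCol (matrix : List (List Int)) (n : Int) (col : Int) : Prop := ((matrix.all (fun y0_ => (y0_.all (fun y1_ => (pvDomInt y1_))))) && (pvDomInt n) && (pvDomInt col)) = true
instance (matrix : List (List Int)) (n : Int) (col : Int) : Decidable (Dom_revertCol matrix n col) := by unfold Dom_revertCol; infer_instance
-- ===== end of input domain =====

-- B replaces A's extract/reverse/write-back phases with a single in-place two-pointer
-- swap pass (objective: simpler). Both A and B mutate `matrix` in place identically in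
-- Python; the theorems here are about the RETURN value.

-- ===== PORT A =====
def revertArray (line : List Int) : List Int :=
  (PySem.List.slice? line none none (-1)).getD line

def revertCol (matrix : List (List Int)) (n : Int) (col : Int) : List (List Int) :=
  let temp := (PySem.List.pyRange 0 (2*n) 1).foldl
    (fun t i => t ++ [PySem.List.pyGetD (PySem.List.pyGetD matrix i []) col 0]) []
  let temp := revertArray temp
  let mtx := (PySem.List.pyRange 0 (2*n) 1).foldl
    (fun acc i => PySem.List.pySetD acc i
      (PySem.List.pySetD (PySem.List.pyGetD acc i []) col (PySem.List.pyGetD temp i 0))) matrix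
  PySem.List.slice mtx none none

-- ===== PORT B =====
def revertCol_alt (matrix : List (List Int)) (n : Int) (col : Int) : List (List Int) :=
  let mtx := (PySem.List.pyRange 0 n 1).foldl
    (fun acc i =>
      let j := 2*n - 1 - i
      let tmp := PySem.List.pyGetD (PySem.List.pyGetD acc i []) col 0
      let acc1 := PySem.List.pySetD acc i
        (PySem.List.pySetD (PySem.List.pyGetD acc i []) col
          (PySem.List.pyGetD (PySem.List.pyGetD acc j []) col 0))
      PySem.List.pySetD acc1 j
        (PySem.List.pySetD (PySem.List.pyGetD acc1 j []) col tmp)) matrix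
  PySem.List.slice mtx none none

-- ===== PRECONDITION & SPEC =====
-- Exactly the inputs on which the Python A returns: the first 2n rows exist and
-- `col` is a valid (possibly negative) Python index into each of them.
def Pre_revertCol (matrix : List (List Int)) (n : Int) (col : Int) : Prop :=
  (2*n).toNat ≤ matrix.length ∧
  ∀ row ∈ matrix.take (2*n).toNat, PySem.Raise.InRange row.length col

instance (matrix : List (List Int)) (n : Int) (col : Int) : Decidable (Pre_revertCol matrix n col) := by
  unfold Pre_revertCol; infer_instance

def pvWitness_revertCol : List (List Int) × Int × Int := ([[1, 2], [3, 4]], 1, 0)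

def Spec_revertCol (matrix : List (List Int)) (n : Int) (col : Int) (out : List (List Int)) : Prop := out = revertCol_alt matrix n col
instance (matrix : List (List Int)) (n : Int) (col : Int) (out : List (List Int)) : Decidable (Spec_revertCol matrix n col out) := by unfold Spec_revertCol; infer_instance

-- ===== CLAIM (what is proved, stated in full; the proofs are below) =====
def Claim_equal_revertCol : Prop := ∀ (matrix : List (List Int)) (n : Int) (col : Int), Dom_revertCol matrix n col → Pre_revertCol matrix n col → Spec_revertCol matrix n col (revertCol matrix n col)

-- ===== LEMMAS AND PROOFS =====

-- any fold whose step preserves length preserves length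
lemma pv_foldl_length {α β : Type} (l : List β) (f : List α → β → List α)
    (h : ∀ acc b, (f acc b).length = acc.length) (xs : List α) :
    (l.foldl f xs).length = xs.length := by
  induction l generalizing xs with
  | nil => rfl
  | cons b l ih => simp [List.foldl, ih, h]

-- A's write-back loop: row k becomes w k (original row k), for every k < m
lemma pv_FA_get (w : Nat → List Int → List Int) :
    ∀ (m : Nat) (xs : List (List Int)), m ≤ xs.length → ∀ k : Nat,
    ((List.range m).foldl (fun acc i => acc.set i (w i (acc.getD i []))) xs)[k]? =
      if k < m then some (w k (xs.getD k [])) else xs[k]? := by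
  intro m
  induction m with
  | zero => intro xs _ k; simp
  | succ m ih =>
    intro xs hm k
    have hm' : m ≤ xs.length := by omega
    have hlen : ((List.range m).foldl (fun acc i => acc.set i (w i (acc.getD i []))) xs).length = xs.length :=
      pv_foldl_length _ _ (fun acc b => by simp) xs
    have hFm : ((List.range m).foldl (fun acc i => acc.set i (w i (acc.getD i []))) xs).getD m []
        = xs.getD m [] := by
      have h1 := ih xs hm' m
      rw [if_neg (lt_irrefl m)] at h1
      rw [List.getD_eq_getElem?_getD, h1, ← List.getD_eq_getElem?_getD]
    rw [List.range_succ, List.foldl_append, List.foldl_cons, List.foldl_nil, hFm,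
      List.getElem?_set, hlen]
    rcases Nat.lt_trichotomy k m with h | h | h
    · rw [if_neg (Nat.ne_of_gt h), ih xs hm' k, if_pos h, if_pos (by omega)]
    · subst h
      rw [if_pos rfl, if_pos (by omega : k < xs.length), if_pos (by omega)]
    · rw [if_neg (Nat.ne_of_lt h), ih xs hm' k, if_neg (by omega), if_neg (by omega)]

-- B's two-pointer loop after i iterations: rows < i and rows > 2n-1-i hold their
-- swapped column value, the middle rows are untouched
lemma pv_FB_get (W : List Int → Int → List Int) (R : List Int → Int) (nn : Nat) :
    ∀ (i : Nat), i ≤ nn → ∀ (xs : List (List Int)), 2*nn ≤ xs.length → ∀ k : Nat,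
    ((List.range i).foldl
      (fun acc k =>
        (acc.set k (W (acc.getD k []) (R (acc.getD (2*nn-1-k) [])))).set (2*nn-1-k)
          (W ((acc.set k (W (acc.getD k []) (R (acc.getD (2*nn-1-k) [])))).getD (2*nn-1-k) [])
             (R (acc.getD k [])))) xs)[k]? =
      if k < i ∨ (2*nn - i ≤ k ∧ k < 2*nn) then
        some (W (xs.getD k []) (R (xs.getD (2*nn-1-k) []))) else xs[k]? := by
  intro i
  induction i with
  | zero =>
    intro _ xs _ k
    rw [List.range_zero, List.foldl_nil, if_neg (by omega)]
  | succ i ih =>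
    intro hi xs hlenx k
    have hi' : i ≤ nn := by omega
    have key := ih hi' xs hlenx
    have hlenF : ((List.range i).foldl
        (fun acc k =>
          (acc.set k (W (acc.getD k []) (R (acc.getD (2*nn-1-k) [])))).set (2*nn-1-k)
            (W ((acc.set k (W (acc.getD k []) (R (acc.getD (2*nn-1-k) [])))).getD (2*nn-1-k) [])
               (R (acc.getD k [])))) xs).length = xs.length :=
      pv_foldl_length _ _ (fun acc b => by simp) xs
    have hFi : ((List.range i).foldl
        (fun acc k =>
          (acc.set k (W (acc.getD k []) (R (acc.getD (2*nn-1-k) [])))).set (2*nn-1-k)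
            (W ((acc.set k (W (acc.getD k []) (R (acc.getD (2*nn-1-k) [])))).getD (2*nn-1-k) [])
               (R (acc.getD k [])))) xs).getD i [] = xs.getD i [] := by
      rw [List.getD_eq_getElem?_getD, key i, if_neg (by omega), ← List.getD_eq_getElem?_getD]
    have hFj : ((List.range i).foldl
        (fun acc k =>
          (acc.set k (W (acc.getD k []) (R (acc.getD (2*nn-1-k) [])))).set (2*nn-1-k)
            (W ((acc.set k (W (acc.getD k []) (R (acc.getD (2*nn-1-k) [])))).getD (2*nn-1-k) [])
               (R (acc.getD k [])))) xs).getD (2*nn-1-i) [] = xs.getD (2*nn-1-i) [] := by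
      rw [List.getD_eq_getElem?_getD, key (2*nn-1-i), if_neg (by omega), ← List.getD_eq_getElem?_getD]
    rw [List.range_succ, List.foldl_append, List.foldl_cons, List.foldl_nil, hFi, hFj]
    have hne : i ≠ 2*nn-1-i := by omega
    have hacc1 : (((List.range i).foldl
        (fun acc k =>
          (acc.set k (W (acc.getD k []) (R (acc.getD (2*nn-1-k) [])))).set (2*nn-1-k)
            (W ((acc.set k (W (acc.getD k []) (R (acc.getD (2*nn-1-k) [])))).getD (2*nn-1-k) [])
               (R (acc.getD k [])))) xs).set i
          (W (xs.getD i []) (R (xs.getD (2*nn-1-i) [])))).getD (2*nn-1-i) [] =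
        xs.getD (2*nn-1-i) [] := by
      rw [List.getD_eq_getElem?_getD, List.getElem?_set, if_neg hne, key (2*nn-1-i),
        if_neg (by omega), ← List.getD_eq_getElem?_getD]
    rw [hacc1, List.getElem?_set, List.length_set, hlenF]
    by_cases hkj : 2*nn-1-i = k
    · subst hkj
      rw [if_pos rfl, if_pos (by omega), if_pos (by omega),
        show 2*nn-1-(2*nn-1-i) = i by omega]
    · rw [if_neg hkj, List.getElem?_set, hlenF]
      by_cases hki : i = k
      · subst hki
        rw [if_pos rfl, if_pos (by omega), if_pos (by omega)]
      · rw [if_neg hki, key k]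
        by_cases hr : k < i ∨ (2*nn - i ≤ k ∧ k < 2*nn)
        · rw [if_pos hr, if_pos (by omega)]
        · rw [if_neg hr, if_neg (by omega)]

-- the two ports agree whenever the first 2n rows exist
lemma pv_eq (matrix : List (List Int)) (n col : Int)
    (hlen : (2*n).toNat ≤ matrix.length) :
    revertCol matrix n col = revertCol_alt matrix n col := by
  by_cases hn : n ≤ 0
  · simp only [revertCol, revertCol_alt, revertArray]
    rw [PySem.List.pyRange_one_eq_nil (by omega : 2*n ≤ 0),
        PySem.List.pyRange_one_eq_nil (by omega : n ≤ 0)]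
    simp [PySem.List.slice_none_none]
  · simp only [revertCol, revertCol_alt, revertArray]
    set nn := n.toNat with hnn
    have hr2 : PySem.List.pyRange 0 (2*n) 1 = (List.range (2*nn)).map (fun k => (Nat.cast k : Int)) := by
      rw [PySem.List.pyRange_one, show ((2*n) - 0).toNat = 2*nn by omega]
      exact List.map_congr_left fun k _ => zero_add _
    have hr1 : PySem.List.pyRange 0 n 1 = (List.range nn).map (fun k => (Nat.cast k : Int)) := by
      rw [PySem.List.pyRange_one, show (n - 0).toNat = nn by omega]
      exact List.map_congr_left fun k _ => zero_add _
    rw [hr1, hr2, List.foldl_map, List.foldl_map, List.foldl_map]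
    simp only [PySem.List.pyGetD_natCast, PySem.List.pySetD_natCast,
      PySem.List.slice?_none_none_neg_one, Option.getD_some,
      PySem.List.foldl_append_singleton_eq_map, List.nil_append,
      PySem.List.slice_none_none]
    -- rewrite B's step into the Nat shape via congr_mem
    rw [PySem.List.foldl_congr_mem (List.range nn) _
      (fun acc k =>
        (acc.set k (PySem.List.pySetD (acc.getD k []) col
            (PySem.List.pyGetD (acc.getD (2*nn-1-k) []) col 0))).set (2*nn-1-k)
          (PySem.List.pySetD
            ((acc.set k (PySem.List.pySetD (acc.getD k []) col
              (PySem.List.pyGetD (acc.getD (2*nn-1-k) []) col 0))).getD (2*nn-1-k) []) col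
            (PySem.List.pyGetD (acc.getD k []) col 0))) matrix ?hcongr]
    case hcongr =>
      intro acc k hk
      have hk' : k < nn := List.mem_range.mp hk
      have hj : (2*n - 1 - (k:Int)) = ((2*nn-1-k : Nat) : Int) := by omega
      rw [hj]
      simp only [PySem.List.pyGetD_natCast, PySem.List.pySetD_natCast]
    -- now both sides are Nat folds; compare elementwise
    apply List.ext_getElem?
    intro k
    rw [pv_FA_get (fun k r => PySem.List.pySetD r col
          ((((List.range (2*nn)).map (fun i => PySem.List.pyGetD (matrix.getD i []) col 0)).reverse).getD k 0))
        (2*nn) matrix (by omega) k]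
    rw [pv_FB_get (fun r v => PySem.List.pySetD r col v)
        (fun r => PySem.List.pyGetD r col 0) nn nn le_rfl matrix (by omega) k]
    by_cases hk : k < 2*nn
    · rw [if_pos hk, if_pos (by omega)]
      have hrev : (((List.range (2*nn)).map (fun i => PySem.List.pyGetD (matrix.getD i []) col 0)).reverse).getD k 0
          = PySem.List.pyGetD (matrix.getD (2*nn-1-k) []) col 0 := by
        rw [List.getD_eq_getElem _ _ (by simp; omega), List.getElem_reverse]
        simp [List.getElem_map, List.getElem_range]
      rw [hrev]
    · rw [if_neg hk, if_neg (by omega)]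

-- ===== VERDICT (by name: the statement is the Claim_ definition above) =====
theorem revertCol_spec : Claim_equal_revertCol := by
  intro matrix n col _ hpre
  unfold Spec_revertCol
  exact pv_eq matrix n col hpre.1
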